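-- pv_equiv track=rewrite | github.com/bohuiKang/algorithm-study-14 | aug_week1/bohui/boj_2920.py | find_scale
-- ===== SOURCE A (Python) =====
-- def find_scale(sound_number):
--     # map을 list로 변환하는 것을 기억하자
--     split_sound = list(map(int, sound_number.split()))
--
--     ascending_start = split_sound[0]
--     descending_start = split_sound[0]
--
--     ascending_list = []
--     descending_list = []
--
--     for _ in range(len(split_sound)):
--         ascending_list.append(ascending_start)
--         ascending_start += 1
--         descending_list.append(descending_start)
--         descending_start -= 1
--
--     if split_sound == ascending_list:
--         return 'ascending'
--     elif split_sound == descending_list: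
--         return 'descending'
--     else:
--         return 'mixed'
-- ===== SOURCE B (Python) =====
-- def find_scale(sound_number):
--     lst = list(map(int, sound_number.split()))
--     first = lst[0]  # raises IndexError on empty input, like the original
--     if all(b - a == 1 for a, b in zip(lst, lst[1:])):
--         return 'ascending'
--     if all(b - a == -1 for a, b in zip(lst, lst[1:])):
--         return 'descending'
--     return 'mixed'
-- ===== Notes on version B (the rewrite author's own statement) =====
-- stated objective: simpler
-- what changed: Instead of materialising two full reference lists (ascending and descending) and comparing them to the input, B does a single adjacent-pair scan testing whether every difference is +1 (then -1).
import Mathlib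
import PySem

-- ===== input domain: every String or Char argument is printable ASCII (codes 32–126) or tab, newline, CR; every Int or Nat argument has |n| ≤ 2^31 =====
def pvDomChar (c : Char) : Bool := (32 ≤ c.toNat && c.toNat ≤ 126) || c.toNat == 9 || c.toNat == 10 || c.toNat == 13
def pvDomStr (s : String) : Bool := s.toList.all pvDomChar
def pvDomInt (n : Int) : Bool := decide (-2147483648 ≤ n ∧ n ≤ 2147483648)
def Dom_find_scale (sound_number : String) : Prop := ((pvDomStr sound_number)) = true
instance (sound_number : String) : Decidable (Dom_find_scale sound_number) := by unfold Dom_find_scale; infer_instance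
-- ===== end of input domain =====

-- B replaces A's two materialised reference lists by a single adjacent-pair difference scan (simpler, same cost).

-- ===== PORT A =====
def find_scale (sound_number : String) : String :=
  let split_sound : List Int :=
    (PySem.Str.split₀ sound_number).map (fun t => (PySem.Int.ofStr? t).getD 0)
  let ascending_start : Int := PySem.List.pyGetD split_sound 0 0
  let descending_start : Int := PySem.List.pyGetD split_sound 0 0
  -- loop state: (ascending_start, descending_start, ascending_list, descending_list)
  let st := (List.range split_sound.length).foldl
    (fun (st : Int × Int × List Int × List Int) _ =>
      (st.1 + 1, st.2.1 - 1, st.2.2.1 ++ [st.1], st.2.2.2 ++ [st.2.1]))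
    (ascending_start, descending_start, ([] : List Int), ([] : List Int))
  if split_sound = st.2.2.1 then "ascending"
  else if split_sound = st.2.2.2 then "descending"
  else "mixed"

-- ===== PORT B =====
def find_scale_alt (sound_number : String) : String :=
  let lst : List Int :=
    (PySem.Str.split₀ sound_number).map (fun t => (PySem.Int.ofStr? t).getD 0)
  let _first : Int := PySem.List.pyGetD lst 0 0  -- lst[0]: Pre_ excludes the empty input, where Python raises IndexError
  if (lst.zip lst.tail).all (fun p => p.2 - p.1 == 1) then "ascending"
  else if (lst.zip lst.tail).all (fun p => p.2 - p.1 == -1) then "descending"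
  else "mixed"

-- ===== PRECONDITION & SPEC =====
-- Pre_ excludes exactly the inputs on which Python A raises: no tokens (IndexError at split_sound[0])
-- or a token that int() cannot parse (ValueError).
def Pre_find_scale (sound_number : String) : Prop :=
  PySem.Str.split₀ sound_number ≠ [] ∧
  ∀ t ∈ PySem.Str.split₀ sound_number, (PySem.Int.ofStr? t).isSome = true
instance (sound_number : String) : Decidable (Pre_find_scale sound_number) := by
  unfold Pre_find_scale; infer_instance

def pvWitness_find_scale : String := "55 54 53 52 51"

def Spec_find_scale (sound_number : String) (out : String) : Prop := out = find_scale_alt sound_number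
instance (sound_number : String) (out : String) : Decidable (Spec_find_scale sound_number out) := by
  unfold Spec_find_scale; infer_instance

-- ===== CLAIM (what is proved, stated in full; the proofs are below) =====
def Claim_equal_find_scale : Prop := ∀ (sound_number : String), Dom_find_scale sound_number → Pre_find_scale sound_number → Spec_find_scale sound_number (find_scale sound_number)

-- ===== LEMMAS AND PROOFS =====

-- the arithmetic progression of length n starting at x with difference d (proof helper)
def pvProg (x d : Int) : Nat → List Int
  | 0 => []
  | n + 1 => x :: pvProg (x + d) d n

theorem pvProg_snoc (d : Int) : ∀ (n : Nat) (x : Int),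
    pvProg x d (n + 1) = pvProg x d n ++ [x + d * n] := by
  intro n
  induction n with
  | zero => intro x; simp [pvProg]
  | succ m ih =>
    intro x
    show x :: pvProg (x + d) d (m + 1) = (x :: pvProg (x + d) d m) ++ [x + d * (m + 1)]
    rw [ih]
    simp only [List.cons_append, List.append_cancel_left_eq, List.cons.injEq]
    refine ⟨trivial, ?_, trivial⟩
    ring

-- A's loop in closed form: it advances the two counters and appends the two arithmetic progressions.
theorem loopA_closed (n : Nat) (a b : Int) (la lb : List Int) :
    (List.range n).foldl
      (fun (st : Int × Int × List Int × List Int) _ =>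
        (st.1 + 1, st.2.1 - 1, st.2.2.1 ++ [st.1], st.2.2.2 ++ [st.2.1]))
      (a, b, la, lb)
    = (a + n, b - n, la ++ pvProg a 1 n, lb ++ pvProg b (-1) n) := by
  induction n with
  | zero => simp [pvProg]
  | succ m ih =>
    rw [List.range_succ, List.foldl_append, ih]
    simp only [List.foldl_cons, List.foldl_nil, pvProg_snoc, Prod.mk.injEq]
    refine ⟨by push_cast; ring, by push_cast; ring, ?_, ?_⟩
    · rw [one_mul, List.append_assoc]
    · rw [neg_one_mul, ← sub_eq_add_neg, List.append_assoc]

-- being the arithmetic progression starting at the head with difference d is the same as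
-- every adjacent difference being d.
theorem chain_iff (d : Int) : ∀ (l : List Int) (x : Int),
    (x :: l = pvProg x d (l.length + 1))
    ↔ ((x :: l).zip l).all (fun p => p.2 - p.1 == d) = true := by
  intro l
  induction l with
  | nil => intro x; simp [pvProg]
  | cons y l ih =>
    intro x
    show (x :: y :: l = x :: pvProg (x + d) d (l.length + 1)) ↔ _
    rw [List.cons.injEq]
    simp only [true_and]
    show (y :: l = (x + d) :: pvProg (x + d + d) d l.length) ↔ _
    rw [List.cons.injEq]
    simp only [List.zip_cons_cons, List.all_cons, Bool.and_eq_true, beq_iff_eq]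
    constructor
    · rintro ⟨hy, hl⟩
      refine ⟨by omega, ?_⟩
      have := (ih (x + d)).mp (by
        show (x + d) :: l = (x + d) :: pvProg (x + d + d) d l.length
        exact congrArg (List.cons (x + d)) hl)
      rw [hy]
      simpa using this
    · rintro ⟨hy, hall⟩
      have hy' : y = x + d := by omega
      subst hy'
      have := (ih (x + d)).mpr (by simpa using hall)
      exact ⟨rfl, by injection this⟩

-- ===== VERDICT (by name: the statement is the Claim_ definition above) =====
theorem find_scale_spec : Claim_equal_find_scale := by
  intro s _ hpre
  unfold Spec_find_scale find_scale find_scale_alt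
  obtain ⟨hne, -⟩ := hpre
  set lst : List Int := (PySem.Str.split₀ s).map (fun t => (PySem.Int.ofStr? t).getD 0) with hlst
  have hlne : lst ≠ [] := by simpa [hlst] using hne
  obtain ⟨x, l, hxl⟩ := List.exists_cons_of_ne_nil hlne
  dsimp only
  rw [loopA_closed]
  have hhead : PySem.List.pyGetD lst 0 0 = x := by
    rw [hxl]; simp [PySem.List.pyGetD_zero_cons]
  rw [hhead, hxl]
  simp only [List.nil_append, List.length_cons, List.tail_cons]
  by_cases h1 : ((x :: l).zip l).all (fun p => p.2 - p.1 == 1) = true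
  · rw [if_pos ((chain_iff 1 l x).mpr h1), if_pos h1]
  · rw [if_neg (fun hc => h1 ((chain_iff 1 l x).mp hc)), if_neg h1]
    by_cases h2 : ((x :: l).zip l).all (fun p => p.2 - p.1 == -1) = true
    · rw [if_pos ((chain_iff (-1) l x).mpr h2), if_pos h2]
    · rw [if_neg (fun hc => h2 ((chain_iff (-1) l x).mp hc)), if_neg h2]
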